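-- pv_equiv track=rewrite | github.com/FrankLicm/cs571 | hw1/src/hw1.py | recover_the_case
-- ===== SOURCE A (Python) =====
-- def recover_the_case(results: list, upper_index: list):
--     # recover the case
--     start = 0
--     last_end = -1
--     for i, result in enumerate(results):
--         result_list = list(result)
--         word_len = len(result)
--         end = start + word_len - 1
--         for index in upper_index:
--             if index > end:
--                 break
--             if index <= last_end:
--                 continue
--             result_list[index - start] = result[index - start].upper()
--         start = start + len(result)
--         last_end = end
--         results[i] = "".join(result_list)
--     return results
-- ===== SOURCE B (Python) =====
-- def recover_the_case(results: list, upper_index: list):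
--     # Two-pointer consumption of upper_index into a per-word hit SET, then a
--     # per-character rebuild: each char is uppercased iff its global position is in the set.
--     j = 0
--     start = 0
--     for i, word in enumerate(results):
--         end = start + len(word) - 1
--         hits = set()
--         while j < len(upper_index) and upper_index[j] <= end:
--             hits.add(upper_index[j])
--             j += 1
--         results[i] = "".join(c.upper() if start + p in hits else c for p, c in enumerate(word))
--         start = end + 1
--     return results
-- ===== Notes on version B (the rewrite author's own statement) =====
-- stated objective: faster
-- what changed: A rescans the whole upper_index list for every word and writes characters in place; B consumes upper_index once with a moving pointer into a per-word hash set and rebuilds each word by a per-character membership test.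
import Mathlib
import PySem

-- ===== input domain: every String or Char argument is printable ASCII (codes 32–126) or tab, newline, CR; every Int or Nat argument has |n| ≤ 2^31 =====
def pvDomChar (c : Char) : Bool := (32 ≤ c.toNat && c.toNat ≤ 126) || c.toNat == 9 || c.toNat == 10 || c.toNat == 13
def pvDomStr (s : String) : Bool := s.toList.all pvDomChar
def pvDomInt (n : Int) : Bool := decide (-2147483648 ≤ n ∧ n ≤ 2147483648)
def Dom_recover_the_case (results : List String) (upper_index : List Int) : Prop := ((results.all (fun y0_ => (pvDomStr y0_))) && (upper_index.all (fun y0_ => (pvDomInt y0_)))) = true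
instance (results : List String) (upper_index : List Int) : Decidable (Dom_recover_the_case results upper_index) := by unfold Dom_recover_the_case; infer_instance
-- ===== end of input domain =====

-- B replaces A's per-word rescan of upper_index and in-place character writes by a
-- single-pointer consumption into a per-word set plus a per-character membership rebuild.
-- Note: both A and B mutate `results` in place in Python (writing results[i]); the
-- equivalence proved here is about the returned list, and B performs the same mutation.

-- ===== PORT A =====
-- inner loop: 'for index in upper_index: if index > end: break; if index <= last_end: continue; result_list[index-start] = result[index-start].upper()'
def pvInnerA (ui : List Int) (start last_end endd : Int) (orig : List Char) (cs : List Char) : List Char :=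
  match ui with
  | [] => cs
  | idx :: rest =>
    if idx > endd then cs
    else if idx ≤ last_end then pvInnerA rest start last_end endd orig cs
    else pvInnerA rest start last_end endd orig
      (PySem.List.pySetD cs (idx - start)
        (PySem.Chars.upperChar (PySem.List.pyGetD orig (idx - start) ' ')))

-- outer loop: 'for i, result in enumerate(results): … results[i] = "".join(result_list)'
def pvOuterA (results : List String) (ui : List Int) (start last_end : Int) : List String :=
  match results with
  | [] => []
  | r :: rs =>
    let orig := r.toList
    let endd := start + (orig.length : Int) - 1
    let cs := pvInnerA ui start last_end endd orig orig
    String.ofList cs :: pvOuterA rs ui (start + (orig.length : Int)) endd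

def recover_the_case (results : List String) (upper_index : List Int) : List String :=
  pvOuterA results upper_index 0 (-1)

-- ===== PORT B =====
-- 'while j < len(upper_index) and upper_index[j] <= end: hits.add(upper_index[j]); j += 1'
-- (the pointer j is modelled by returning the unconsumed tail alongside the set)
def pvCollectB (ui : List Int) (endd : Int) (hits : PySem.Set Int) : PySem.Set Int × List Int :=
  match ui with
  | [] => (hits, [])
  | idx :: rest =>
    if idx ≤ endd then pvCollectB rest endd (PySem.Set.add hits idx)
    else (hits, idx :: rest)

-- '"".join(c.upper() if start + p in hits else c for p, c in enumerate(word))'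
def pvRebuildB (word : List Char) (start : Int) (hits : PySem.Set Int) : List Char :=
  (PySem.List.enumerate word 0).map
    (fun pc => if PySem.Set.contains hits (start + pc.1) then PySem.Chars.upperChar pc.2 else pc.2)

def pvOuterB (results : List String) (ui : List Int) (start : Int) : List String :=
  match results with
  | [] => []
  | r :: rs =>
    let cs := r.toList
    let endd := start + (cs.length : Int) - 1
    let p := pvCollectB ui endd PySem.Set.empty
    String.ofList (pvRebuildB cs start p.1) :: pvOuterB rs p.2 (endd + 1)

def recover_the_case_alt (results : List String) (upper_index : List Int) : List String :=
  pvOuterB results upper_index 0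

-- ===== PRECONDITION & SPEC =====
def Spec_recover_the_case (results : List String) (upper_index : List Int) (out : List String) : Prop := out = recover_the_case_alt results upper_index
instance (results : List String) (upper_index : List Int) (out : List String) : Decidable (Spec_recover_the_case results upper_index out) := by unfold Spec_recover_the_case; infer_instance

-- ===== CLAIM =====
def Claim_equal_recover_the_case : Prop := ∀ (results : List String) (upper_index : List Int), Dom_recover_the_case results upper_index → Spec_recover_the_case results upper_index (recover_the_case results upper_index)

-- ===== LEMMAS AND PROOFS =====

-- A's inner loop skips (via `continue`) every already-consumed index ≤ last_end.
theorem pvInnerA_skip_prefix (pre suf : List Int) (start endd : Int)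
    (orig cs : List Char)
    (hpre : ∀ x ∈ pre, x ≤ start - 1) (hle : start - 1 ≤ endd) :
    pvInnerA (pre ++ suf) start (start - 1) endd orig cs
      = pvInnerA suf start (start - 1) endd orig cs := by
  induction pre with
  | nil => rfl
  | cons x xs ih =>
    have hx := hpre x (by simp)
    simp only [List.cons_append, pvInnerA]
    rw [if_neg (by omega), if_pos hx]
    exact ih (fun y hy => hpre y (by simp [hy]))

-- pvCollectB consumes exactly the ≤-endd prefix and collects its elements into the set
theorem pvCollectB_spec (ui : List Int) (endd : Int) (hits : PySem.Set Int) :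
    (pvCollectB ui endd hits).2 = ui.dropWhile (fun i => decide (i ≤ endd))
    ∧ ∀ y : Int, y ∈ (pvCollectB ui endd hits).1
        ↔ y ∈ hits ∨ y ∈ ui.takeWhile (fun i => decide (i ≤ endd)) := by
  induction ui generalizing hits with
  | nil => simp [pvCollectB]
  | cons idx rest ih =>
    by_cases h : idx ≤ endd
    · rw [List.dropWhile_cons_of_pos (by simpa using h),
        List.takeWhile_cons_of_pos (by simpa using h)]
      simp only [pvCollectB, if_pos h]
      obtain ⟨h2, h1⟩ := ih (PySem.Set.add hits idx)
      refine ⟨h2, fun y => ?_⟩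
      rw [h1, PySem.Set.mem_add]
      simp only [List.mem_cons]
      tauto
    · rw [List.dropWhile_cons_of_neg (by simpa using h),
        List.takeWhile_cons_of_neg (by simpa using h)]
      simp [pvCollectB, if_neg h]

-- pointwise characterisation of A's inner loop (fresh word: last_end = start - 1):
-- position k ends up uppercased iff the global index start + k occurs in the ≤-endd prefix.
theorem pvInnerA_getElem? (suf : List Int) (start endd : Int) (orig : List Char)
    (hend : endd = start + (orig.length : Int) - 1) :
    ∀ (cs : List Char), cs.length = orig.length → ∀ k : Nat,
    (pvInnerA suf start (start - 1) endd orig cs).length = orig.length ∧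
    (pvInnerA suf start (start - 1) endd orig cs)[k]?
      = if (start + (k : Int)) ∈ suf.takeWhile (fun i => decide (i ≤ endd))
        then (orig[k]?).map PySem.Chars.upperChar else cs[k]? := by
  induction suf with
  | nil =>
    intro cs hlen k
    exact ⟨hlen, by simp [pvInnerA]⟩
  | cons idx rest ih =>
    intro cs hlen k
    by_cases h1 : idx ≤ endd
    · rw [List.takeWhile_cons_of_pos (by simpa using h1)]
      simp only [pvInnerA]
      rw [if_neg (by omega)]
      by_cases h2 : idx ≤ start - 1
      · -- skipped by `continue`; idx < start so it can never equal start + k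
        rw [if_pos h2]
        obtain ⟨hl, hv⟩ := ih cs hlen k
        refine ⟨hl, ?_⟩
        rw [hv]
        have hiff : ((start + (k : Int)) ∈ idx :: rest.takeWhile (fun i => decide (i ≤ endd)))
            ↔ (start + (k : Int)) ∈ rest.takeWhile (fun i => decide (i ≤ endd)) := by
          simp only [List.mem_cons]
          constructor
          · rintro (h | h)
            · omega
            · exact h
          · exact Or.inr
        rw [if_congr hiff rfl rfl]
      · -- written: idx - start is in range
        rw [if_neg h2]
        have hge : start ≤ idx := by omega
        have hlt : idx - start < (orig.length : Int) := by omega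
        have hnonneg : (0 : Int) ≤ idx - start := by omega
        set n : Nat := (idx - start).toNat with hn
        have hcast : (idx - start) = (n : Int) := by omega
        have hnlt : n < orig.length := by omega
        have hwrite : PySem.List.pySetD cs (idx - start)
              (PySem.Chars.upperChar (PySem.List.pyGetD orig (idx - start) ' '))
            = cs.set n (PySem.Chars.upperChar orig[n]) := by
          rw [hcast, PySem.List.pySetD_natCast, PySem.List.pyGetD_natCast]
          rw [List.getD_eq_getElem?_getD, List.getElem?_eq_getElem hnlt]
          rfl
        rw [hwrite]
        obtain ⟨hl, hv⟩ := ih (cs.set n (PySem.Chars.upperChar orig[n]))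
          (by simpa using hlen) k
        refine ⟨hl, ?_⟩
        rw [hv]
        by_cases hmem : (start + (k : Int)) ∈ rest.takeWhile (fun i => decide (i ≤ endd))
        · rw [if_pos hmem, if_pos (by simp [hmem])]
        · by_cases hk : k = n
          · subst hk
            rw [if_neg hmem, if_pos (by simp only [List.mem_cons]; left; omega)]
            rw [List.getElem?_set_self (by omega), List.getElem?_eq_getElem hnlt]
            simp
          · have hne : (start + (k : Int)) ≠ idx := by omega
            have hcond : (start + (k : Int)) ∉ idx :: rest.takeWhile (fun i => decide (i ≤ endd)) := by
              intro hc
              rcases List.mem_cons.mp hc with h | h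
              · exact hne h
              · exact hmem h
            rw [if_neg hmem, if_neg hcond, List.getElem?_set_ne (by omega)]
    · rw [List.takeWhile_cons_of_neg (by simpa using h1)]
      simp only [pvInnerA]
      rw [if_pos (by omega)]
      simp [hlen]

-- on a fresh word, A's inner loop computes exactly B's rebuild from B's collected set
theorem pvInnerA_eq_rebuild (suf : List Int) (start endd : Int) (orig : List Char)
    (hend : endd = start + (orig.length : Int) - 1) :
    pvInnerA suf start (start - 1) endd orig orig
      = pvRebuildB orig start (pvCollectB suf endd PySem.Set.empty).1 := by
  obtain ⟨-, hmem⟩ := pvCollectB_spec suf endd PySem.Set.empty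
  have hlen2 : (pvRebuildB orig start (pvCollectB suf endd PySem.Set.empty).1).length
      = orig.length := by
    simp [pvRebuildB, PySem.List.length_enumerate]
  have hcon : ∀ g : Int, PySem.Set.contains (pvCollectB suf endd PySem.Set.empty).1 g
      = decide (g ∈ suf.takeWhile (fun i => decide (i ≤ endd))) := by
    intro g
    have := hmem g
    simp only [PySem.Set.empty, List.not_mem_nil, false_or] at this
    simp [PySem.Set.contains_eq_listContains, this]
  apply List.ext_getElem?
  intro k
  obtain ⟨hl, hv⟩ := pvInnerA_getElem? suf start endd orig hend orig rfl k
  rw [hv]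
  by_cases hk : k < orig.length
  · have hrb : (pvRebuildB orig start (pvCollectB suf endd PySem.Set.empty).1)[k]?
        = some (if PySem.Set.contains (pvCollectB suf endd PySem.Set.empty).1
                  (start + (k : Int)) then PySem.Chars.upperChar orig[k] else orig[k]) := by
      simp [pvRebuildB, List.getElem?_map, PySem.List.getElem?_enumerate,
        List.getElem?_eq_getElem hk]
    rw [hrb, hcon, List.getElem?_eq_getElem hk]
    by_cases hmem2 : (start + (k : Int)) ∈ suf.takeWhile (fun i => decide (i ≤ endd))
    · rw [if_pos hmem2, if_pos (by simpa using hmem2)]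
      rfl
    · rw [if_neg hmem2, if_neg (by simpa using hmem2)]
  · have ho : orig[k]? = none := List.getElem?_eq_none (by omega)
    have hr : (pvRebuildB orig start (pvCollectB suf endd PySem.Set.empty).1)[k]? = none :=
      List.getElem?_eq_none (by omega)
    rw [ho, hr]
    split <;> simp

theorem pvOuterA_eq_outerB (results : List String) (pre suf : List Int) (start : Int)
    (hpre : ∀ x ∈ pre, x ≤ start - 1) :
    pvOuterA results (pre ++ suf) start (start - 1) = pvOuterB results suf start := by
  induction results generalizing pre suf start with
  | nil => rfl
  | cons r rs ih =>
    simp only [pvOuterA, pvOuterB]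
    generalize hE : start + (r.toList.length : Int) - 1 = E
    have hstart : start + (r.toList.length : Int) = E + 1 := by omega
    rw [hstart]
    obtain ⟨htail, -⟩ := pvCollectB_spec suf E PySem.Set.empty
    have hsplit : suf = suf.takeWhile (fun i => decide (i ≤ E))
        ++ (pvCollectB suf E PySem.Set.empty).2 := by
      rw [htail, List.takeWhile_append_dropWhile]
    refine congrArg₂ _ ?_ ?_
    · rw [pvInnerA_skip_prefix pre suf start E _ _ hpre (by omega),
        pvInnerA_eq_rebuild suf start E r.toList (by omega)]
    · have h2 : pre ++ suf = (pre ++ suf.takeWhile (fun i => decide (i ≤ E)))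
          ++ (pvCollectB suf E PySem.Set.empty).2 := by
        rw [List.append_assoc, ← hsplit]
      have key := ih (pre ++ suf.takeWhile (fun i => decide (i ≤ E)))
        ((pvCollectB suf E PySem.Set.empty).2) (E + 1)
        (by
          intro x hx
          rcases List.mem_append.mp hx with h | h
          · have := hpre x h; omega
          · have := List.mem_takeWhile_imp h
            simp only [decide_eq_true_eq] at this
            omega)
      have e1 : E + 1 - 1 = E := by omega
      rw [e1] at key
      rw [h2]
      exact key

-- ===== VERDICT =====
theorem recover_the_case_spec : Claim_equal_recover_the_case := by
  intro results upper_index _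
  show recover_the_case results upper_index = recover_the_case_alt results upper_index
  unfold recover_the_case recover_the_case_alt
  have h : (0 : Int) - 1 = -1 := rfl
  rw [← h]
  exact pvOuterA_eq_outerB results [] upper_index 0 (by simp)
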